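-- pv_equiv track=rewrite | github.com/Milena4420/university-exercises | data-structures/Serie 2, SDD-3.py | mcCarthy
-- ===== SOURCE A (Python) =====
-- def mcCarthy(n: int):
--     if n<=0:
--         return -1
--     elif n>100:
--         return n-10
--     else:
--         return mcCarthy(mcCarthy(n+11))
--     return None
-- ===== SOURCE B (Python) =====
-- def mcCarthy(n: int):
--     # Closed form: by the McCarthy 91 theorem, the nested recursion yields 91 for 1 <= n <= 100.
--     if n <= 0:
--         return -1
--     return n - 10 if n > 100 else 91
-- ===== Notes on version B (the rewrite author's own statement) =====
-- stated objective: simpler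
-- what changed: Replaced the nested double self-recursion mcCarthy(mcCarthy(n+11)) by the closed-form case analysis (n<=0 gives -1, n>100 gives n-10, otherwise the constant value proved by the McCarthy theorem).
import Mathlib
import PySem

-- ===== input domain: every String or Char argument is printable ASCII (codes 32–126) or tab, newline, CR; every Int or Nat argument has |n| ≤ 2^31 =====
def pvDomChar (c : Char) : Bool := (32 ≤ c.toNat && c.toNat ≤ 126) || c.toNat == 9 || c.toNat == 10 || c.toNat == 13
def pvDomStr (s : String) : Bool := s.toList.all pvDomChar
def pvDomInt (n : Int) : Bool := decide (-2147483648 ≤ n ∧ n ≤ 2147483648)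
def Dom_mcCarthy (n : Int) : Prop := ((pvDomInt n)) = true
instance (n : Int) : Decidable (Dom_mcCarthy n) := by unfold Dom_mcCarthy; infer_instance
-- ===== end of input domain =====

-- B replaces A's nested recursion by the McCarthy-91 closed form (simpler, constant time).

-- ===== PORT A =====
-- A's nested recursion, transliterated with a fuel parameter; fuel 150 exceeds the
-- maximum recursion depth (20, reached at n = 1), so the fuel-exhausted branch is never
-- taken on any integer input (the equivalence theorem below only needs f >= 102 - n).
def mcCarthyFuel : Nat → Int → Int
  | 0, _ => -1
  | f + 1, n =>
    if n ≤ 0 then -1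
    else if n > 100 then n - 10
    else mcCarthyFuel f (mcCarthyFuel f (n + 11))

def mcCarthy (n : Int) : Int := mcCarthyFuel 150 n

-- ===== PORT B =====
def mcCarthy_alt (n : Int) : Int :=
  if n ≤ 0 then -1
  else if n > 100 then n - 10
  else 91

-- ===== PRECONDITION & SPEC =====
def Spec_mcCarthy (n : Int) (out : Int) : Prop := out = mcCarthy_alt n
instance (n : Int) (out : Int) : Decidable (Spec_mcCarthy n out) := by unfold Spec_mcCarthy; infer_instance

-- ===== CLAIM (what is proved, stated in full; the proofs are below) =====
def Claim_equal_mcCarthy : Prop := ∀ (n : Int), Dom_mcCarthy n → Spec_mcCarthy n (mcCarthy n)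

-- ===== LEMMAS AND PROOFS =====

-- Above 100 the recursion returns n - 10 as soon as any fuel is left.
theorem mcCarthyFuel_big (f : Nat) (m : Int) (hm : m > 100) (hf : 1 ≤ f) :
    mcCarthyFuel f m = m - 10 := by
  cases f with
  | zero => omega
  | succ f' =>
    unfold mcCarthyFuel
    rw [if_neg (by omega), if_pos hm]

-- On 1 ≤ n ≤ 100 the fueled recursion returns 91 whenever 102 - n ≤ f
-- (strong induction on 101 - n, the classic McCarthy-91 argument).
theorem mcCarthyFuel_mid_aux : ∀ (k : Nat) (f : Nat) (n : Int), 1 ≤ n → n ≤ 100 →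
    (101 - n).toNat ≤ k → 102 - n ≤ (f : Int) → mcCarthyFuel f n = 91 := by
  intro k
  induction k with
  | zero => intro f n h1 h2 hk hf; omega
  | succ k ih =>
    intro f n h1 h2 hk hf
    cases f with
    | zero => simp at hf; omega
    | succ f' =>
      unfold mcCarthyFuel
      rw [if_neg (by omega), if_neg (by omega)]
      by_cases hbig : n + 11 > 100
      · -- inner call hits the n > 100 branch and returns n + 1
        rw [mcCarthyFuel_big f' (n + 11) hbig (by omega)]
        have : n + 11 - 10 = n + 1 := by ring
        rw [this]
        by_cases h100 : n = 100
        · rw [mcCarthyFuel_big f' (n + 1) (by omega) (by omega)]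
          omega
        · exact ih f' (n + 1) (by omega) (by omega) (by omega) (by push_cast at hf ⊢; omega)
      · -- inner call returns 91 by IH, then the outer call on 91 returns 91 by IH
        rw [ih f' (n + 11) (by omega) (by omega) (by omega) (by push_cast at hf ⊢; omega)]
        exact ih f' 91 (by omega) (by omega) (by omega) (by push_cast at hf ⊢; omega)

theorem mcCarthyFuel_mid (n : Int) (h1 : 1 ≤ n) (h2 : n ≤ 100) : mcCarthyFuel 150 n = 91 :=
  mcCarthyFuel_mid_aux (101 - n).toNat 150 n h1 h2 (le_refl _) (by push_cast; omega)

-- ===== VERDICT (by name: the statement is the Claim_ definition above) =====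
theorem mcCarthy_spec : Claim_equal_mcCarthy := by
  intro n _
  unfold Spec_mcCarthy mcCarthy mcCarthy_alt
  rw [show (150 : Nat) = 149 + 1 from rfl]
  by_cases h0 : n ≤ 0
  · unfold mcCarthyFuel
    rw [if_pos h0]; rw [if_pos h0]
  · by_cases h1 : n > 100
    · unfold mcCarthyFuel
      rw [if_neg h0, if_pos h1, if_neg h0, if_pos h1]
    · rw [mcCarthyFuel_mid n (by omega) (by omega)]
      rw [if_neg h0, if_neg h1]
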